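-- pv_equiv track=rewrite | github.com/tangjiewei0336/ascii_choir | parser.py | _merge_part_lines
-- ===== SOURCE A (Python) =====
-- def _bracket_depth(s: str) -> int:
--     """计算字符串末尾的括号深度（[ ( 为 +1，] ) 为 -1）"""
--     return sum(1 for c in s if c in "[(") - sum(1 for c in s if c in "])")
--
-- def _merge_part_lines(lines: list[str]) -> list[str]:
--     """
--     合并跨行的括号内容。括号可跨行/篇章，与小节非嵌套。
--     当某行有未闭合括号时，与后续行合并直至平衡。
--     """
--     merged: list[str] = []
--     i = 0
--     while i < len(lines):
--         line = lines[i]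
--         if not line.strip().startswith("&"):
--             i += 1
--             continue
--         content = line
--         depth = _bracket_depth(content)
--         j = i + 1
--         while depth != 0 and j < len(lines):
--             content += "\n" + lines[j]
--             depth = _bracket_depth(content)
--             j += 1
--         merged.append(content)
--         i = j
--     return merged
-- ===== SOURCE B (Python) =====
-- def _bracket_depth(s: str) -> int:
--     return sum(1 for c in s if c in "[(") - sum(1 for c in s if c in "])")
--
-- def _merge_part_lines(lines: list[str]) -> list[str]:
--     # Single pass: keep a running bracket depth, adding each appended line's
--     # delta instead of rescanning the whole merged content every time.
--     merged: list[str] = []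
--     buf = None
--     depth = 0
--     for line in lines:
--         if buf is None:
--             if not line.strip().startswith("&"):
--                 continue
--             buf = line
--             depth = _bracket_depth(line)
--         else:
--             buf = buf + "\n" + line
--             depth += _bracket_depth(line)
--         if depth == 0:
--             merged.append(buf)
--             buf = None
--     if buf is not None:
--         merged.append(buf)
--     return merged
-- ===== Notes on version B (the rewrite author's own statement) =====
-- stated objective: alternative
-- what changed: Replaced the index-based outer/inner while loops that rescan the whole merged content with _bracket_depth after every appended line by a single pass over the lines that keeps a running bracket depth and adds each appended line's depth delta once.
import Mathlib
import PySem

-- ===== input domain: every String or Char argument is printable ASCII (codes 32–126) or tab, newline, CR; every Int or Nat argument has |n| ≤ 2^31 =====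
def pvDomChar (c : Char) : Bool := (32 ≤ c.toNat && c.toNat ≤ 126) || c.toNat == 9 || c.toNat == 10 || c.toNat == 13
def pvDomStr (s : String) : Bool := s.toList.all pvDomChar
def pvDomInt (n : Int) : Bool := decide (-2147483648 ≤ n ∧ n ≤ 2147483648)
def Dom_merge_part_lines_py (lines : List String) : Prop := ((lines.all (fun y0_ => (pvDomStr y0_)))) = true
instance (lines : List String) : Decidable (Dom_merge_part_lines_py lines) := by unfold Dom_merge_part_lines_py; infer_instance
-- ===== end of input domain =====

-- B merges bracket-open '&' blocks in one pass, keeping a running bracket depth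
-- updated by each appended line's delta instead of rescanning the merged content after every append.

-- ===== PORT A =====
-- shared module helper _bracket_depth (used by both Pythons)
def pyBracketDepth (s : String) : Int :=
  ((s.toList.countP (fun c => "[(".toList.contains c) : Int))
    - ((s.toList.countP (fun c => "])".toList.contains c) : Int))

def mergeInnerA : String → Int → List String → String × List String
  | content, depth, rest =>
    if depth ≠ 0 then
      match rest with
      | [] => (content, [])
      | l :: rs =>
        mergeInnerA (content ++ "\n" ++ l) (pyBracketDepth (content ++ "\n" ++ l)) rs
    else (content, rest)
  termination_by _ _ rest => rest.length

theorem mergeInnerA_len (content : String) (depth : Int) (rest : List String) :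
    (mergeInnerA content depth rest).2.length ≤ rest.length := by
  induction rest generalizing content depth with
  | nil => rw [mergeInnerA]; split <;> simp
  | cons l rs ih =>
    rw [mergeInnerA]
    split
    · exact Nat.le_trans (ih _ _) (Nat.le_succ _)
    · simp

def mergeOuterA : List String → List String
  | [] => []
  | line :: rest =>
    if ¬ (PySem.Str.startswith (PySem.Str.strip line) "&") then mergeOuterA rest
    else
      (mergeInnerA line (pyBracketDepth line) rest).1 ::
        mergeOuterA (mergeInnerA line (pyBracketDepth line) rest).2
  termination_by ls => ls.length
  decreasing_by
  · simp
  · exact Nat.lt_succ_of_le (mergeInnerA_len _ _ _)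

def merge_part_lines_py (lines : List String) : List String := mergeOuterA lines

-- ===== PORT B =====
def mergeGoB : Option String → Int → List String → List String
  | buf, _, [] => (match buf with | none => [] | some b => [b])
  | buf, depth, line :: rest =>
    match buf with
    | none =>
      if PySem.Str.startswith (PySem.Str.strip line) "&" then
        let d := pyBracketDepth line
        if d = 0 then line :: mergeGoB none 0 rest else mergeGoB (some line) d rest
      else mergeGoB none depth rest
    | some b0 =>
      let b := b0 ++ "\n" ++ line
      let d := depth + pyBracketDepth line
      if d = 0 then b :: mergeGoB none 0 rest else mergeGoB (some b) d rest

def merge_part_lines_py_alt (lines : List String) : List String := mergeGoB none 0 lines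

-- ===== PRECONDITION & SPEC =====
def Spec_merge_part_lines_py (lines : List String) (out : List String) : Prop := out = merge_part_lines_py_alt lines
instance (lines : List String) (out : List String) : Decidable (Spec_merge_part_lines_py lines out) := by unfold Spec_merge_part_lines_py; infer_instance

-- ===== CLAIM (what is proved, stated in full; the proofs are below) =====
def Claim_equal_merge_part_lines_py : Prop := ∀ (lines : List String), Dom_merge_part_lines_py lines → Spec_merge_part_lines_py lines (merge_part_lines_py lines)

-- ===== LEMMAS AND PROOFS =====

-- bracket depth is additive across the "\n" join A performs
theorem pyBracketDepth_append (a l : String) :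
    pyBracketDepth (a ++ "\n" ++ l) = pyBracketDepth a + pyBracketDepth l := by
  simp [pyBracketDepth, String.toList_append, List.countP_append]
  ring

-- B's in-progress buffer tracks A's inner merging loop exactly
theorem mergeGoB_some (rest : List String) :
    ∀ (b : String) (d : Int), d = pyBracketDepth b → d ≠ 0 →
      mergeGoB (some b) d rest =
        (mergeInnerA b d rest).1 :: mergeGoB none 0 (mergeInnerA b d rest).2 := by
  induction rest with
  | nil =>
    intro b d hd hne
    rw [mergeInnerA]
    simp [hne, mergeGoB]
  | cons l rs ih =>
    intro b d hd hne
    have hadd : d + pyBracketDepth l = pyBracketDepth (b ++ "\n" ++ l) := by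
      rw [pyBracketDepth_append, hd]
    rw [mergeInnerA, if_pos hne, mergeGoB]
    simp only [hadd]
    by_cases h0 : pyBracketDepth (b ++ "\n" ++ l) = 0
    · rw [if_pos h0, mergeInnerA.eq_def]
      simp [h0]
    · rw [if_neg h0]
      exact ih (b ++ "\n" ++ l) _ rfl h0

theorem mergeGoB_eq_outer : ∀ (n : Nat) (ls : List String), ls.length ≤ n →
    mergeGoB none 0 ls = mergeOuterA ls := by
  intro n
  induction n with
  | zero =>
    intro ls h
    have : ls = [] := List.eq_nil_of_length_eq_zero (Nat.le_zero.mp h)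
    subst this
    rw [mergeOuterA, mergeGoB]
  | succ n ih =>
    intro ls h
    match ls with
    | [] => rw [mergeOuterA, mergeGoB]
    | line :: rest =>
      rw [mergeOuterA, mergeGoB]
      by_cases hs : PySem.Str.startswith (PySem.Str.strip line) "&"
      · rw [if_pos hs, if_neg (not_not_intro hs)]
        by_cases h0 : pyBracketDepth line = 0
        · rw [if_pos h0, mergeInnerA.eq_def]
          simp only [h0, ne_eq, not_true_eq_false, if_false]
          rw [ih rest (Nat.le_of_succ_le_succ h)]
        · rw [if_neg h0, mergeGoB_some rest line (pyBracketDepth line) rfl h0]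
          congr 1
          exact ih _ (Nat.le_trans (mergeInnerA_len _ _ _) (Nat.le_of_succ_le_succ h))
      · rw [if_neg hs, if_pos hs]
        exact ih rest (Nat.le_of_succ_le_succ h)

-- ===== VERDICT (by name: the statement is the Claim_ definition above) =====
theorem merge_part_lines_py_spec : Claim_equal_merge_part_lines_py := by
  intro lines _
  unfold Spec_merge_part_lines_py merge_part_lines_py merge_part_lines_py_alt
  exact (mergeGoB_eq_outer lines.length lines (Nat.le_refl _)).symm
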